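-- pv_equiv track=rewrite | github.com/pcismyname/SF210 | is_all_vowels.py | is_all_vowels
-- ===== SOURCE A (Python) =====
-- def is_all_vowels(word):
--     check = True
--     word = word.lower()
--     vowel = ['a','e','i','o','u']
--     for i in word:
--         if i >= 'a' and i <= 'z':
--             if i not in vowel:
--                 return False
--     return True
-- ===== SOURCE B (Python) =====
-- def is_all_vowels(word):
--     letters = {c for c in word.lower() if 'a' <= c <= 'z'}
--     return letters <= {'a', 'e', 'i', 'o', 'u'}
-- ===== Notes on version B (the rewrite author's own statement) =====
-- stated objective: idiomatic
-- what changed: Replaces the early-return loop with repeated list membership tests by building the set of lowercase letters once and deciding the answer with a single subset test against the vowel set.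
import Mathlib
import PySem

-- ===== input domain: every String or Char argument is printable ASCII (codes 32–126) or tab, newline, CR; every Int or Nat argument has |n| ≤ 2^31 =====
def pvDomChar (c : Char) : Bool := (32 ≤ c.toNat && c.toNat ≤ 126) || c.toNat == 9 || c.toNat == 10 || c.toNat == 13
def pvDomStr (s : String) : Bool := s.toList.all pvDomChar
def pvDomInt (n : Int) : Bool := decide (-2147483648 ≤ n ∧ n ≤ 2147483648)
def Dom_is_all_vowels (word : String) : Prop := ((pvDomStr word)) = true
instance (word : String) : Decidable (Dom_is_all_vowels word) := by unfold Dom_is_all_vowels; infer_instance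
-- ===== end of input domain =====

-- B builds the set of lowercase letters once and answers with a single subset test against the vowel set (alternative decomposition, same cost).


-- ===== PORT A =====
-- A's for-loop with early return, as structural recursion over the characters
def isAllVowelsGo (vowel : List Char) : List Char → Bool
  | [] => true
  | i :: rest =>
      if i ≥ 'a' && i ≤ 'z' then
        if !(vowel.contains i) then false else isAllVowelsGo vowel rest
      else isAllVowelsGo vowel rest

def is_all_vowels (word : String) : Bool :=
  let word := PySem.Str.lower word
  let vowel : List Char := ['a', 'e', 'i', 'o', 'u']
  isAllVowelsGo vowel word.toList

-- ===== PORT B =====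
def is_all_vowels_alt (word : String) : Bool :=
  let letters : PySem.Set Char :=
    PySem.Set.ofList ((PySem.Str.lower word).toList.filter (fun c => 'a' ≤ c && c ≤ 'z'))
  PySem.Set.issubset letters (PySem.Set.ofList ['a', 'e', 'i', 'o', 'u'])

-- ===== PRECONDITION & SPEC =====
def Spec_is_all_vowels (word : String) (out : Bool) : Prop := out = is_all_vowels_alt word
instance (word : String) (out : Bool) : Decidable (Spec_is_all_vowels word out) := by unfold Spec_is_all_vowels; infer_instance

-- ===== CLAIM (what is proved, stated in full; the proofs are below) =====
def Claim_equal_is_all_vowels : Prop := ∀ (word : String), Dom_is_all_vowels word → Spec_is_all_vowels word (is_all_vowels word)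

-- ===== LEMMAS AND PROOFS =====

-- A's loop returns true iff every in-range letter of the list is a vowel
theorem isAllVowelsGo_eq_true_iff (vowel : List Char) (l : List Char) :
    isAllVowelsGo vowel l = true ↔ ∀ c ∈ l, ('a' ≤ c && c ≤ 'z') = true → c ∈ vowel := by
  induction l with
  | nil => simp [isAllVowelsGo]
  | cons i rest ih =>
      simp only [isAllVowelsGo, List.mem_cons]
      by_cases h : ('a' ≤ i && i ≤ 'z') = true
      · by_cases hv : i ∈ vowel
        · rw [if_pos h, if_neg (by simp [hv]), ih]
          constructor
          · rintro hall c (rfl | hc) hg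
            · exact hv
            · exact hall c hc hg
          · exact fun hall c hc hg => hall c (Or.inr hc) hg
        · rw [if_pos h, if_pos (by simp [hv])]
          simp only [Bool.false_eq_true, false_iff]
          exact fun hall => hv (hall i (Or.inl rfl) h)
      · rw [if_neg h, ih]
        constructor
        · rintro hall c (rfl | hc) hg
          · exact absurd hg h
          · exact hall c hc hg
        · exact fun hall c hc hg => hall c (Or.inr hc) hg

theorem is_all_vowels_agree (word : String) :
    is_all_vowels word = is_all_vowels_alt word := by
  rw [Bool.eq_iff_iff]
  unfold is_all_vowels is_all_vowels_alt
  rw [isAllVowelsGo_eq_true_iff, PySem.Set.issubset_iff]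
  constructor
  · intro h c hc
    rw [PySem.Set.mem_ofList, List.mem_filter] at hc
    rw [PySem.Set.mem_ofList]
    exact h c hc.1 hc.2
  · intro h c hc hg
    have := h c (by rw [PySem.Set.mem_ofList, List.mem_filter]; exact ⟨hc, hg⟩)
    rwa [PySem.Set.mem_ofList] at this

-- ===== VERDICT (by name: the statement is the Claim_ definition above) =====
theorem is_all_vowels_spec : Claim_equal_is_all_vowels := by
  intro word _
  exact is_all_vowels_agree word
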